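-- pv_equiv track=rewrite | github.com/lMoonHawk/AoC-py | 2023/day_07.py | hand_hash
-- ===== SOURCE A (Python) =====
-- def get_strength(hand):
--     max_val = 13**5
--     dups = [hand.count(lab) for lab in hand]
--     nb_dups = [dups.count(k + 1) // (k + 1) for k in range(5)]
--
--     if nb_dups[5 - 1] == 1:
--         return max_val * 6
--     elif nb_dups[4 - 1] == 1:
--         return max_val * 5
--     elif nb_dups[3 - 1] == 1 and nb_dups[2 - 1] == 1:
--         return max_val * 4
--     elif nb_dups[3 - 1] == 1:
--         return max_val * 3
--     elif nb_dups[2 - 1] == 2: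
--         return max_val * 2
--     elif nb_dups[2 - 1] == 1:
--         return max_val * 1
--     else:
--         return 0
--
-- def hand_hash(hand, joker_rule):
--     """Return a perfect hash of the hand, that represents the hand's power."""
--     # Hash the card values based on ordering, converting base 13 to 10
--     # lab   base 13 base 10
--     # 22223 00001   1
--     # AKQJT CBA98   368714
--     # Then add hand strength*100000_13 (0 for high card up to 6 for five of a kind)
--
--     if not joker_rule:
--         values = ["2", "3", "4", "5", "6", "7", "8", "9", "T", "J", "Q", "K", "A"]
--     else:
--         values = ["J", "2", "3", "4", "5", "6", "7", "8", "9", "T", "Q", "K", "A"]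
--
--     value = sum(values.index(lab) * 13 ** (4 - k) for k, lab in enumerate(hand))
--     if not joker_rule or "J" not in hand:
--         strength = get_strength(hand)
--     else:
--         strength = max(get_strength(hand.replace("J", joker)) for joker in values)
--
--     return strength + value
-- ===== SOURCE B (Python) =====
-- def _strength(hand):
--     # signature = multiplicities of the distinct labels, largest first
--     sig = sorted((hand.count(c) for c in dict.fromkeys(hand)), reverse=True)
--     top = sig[0] if sig else 0
--     second = sig[1] if len(sig) > 1 else 0
--     if top == 5:
--         r = 6
--     elif top == 4:
--         r = 5
--     elif top == 3 and second == 2: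
--         r = 4
--     elif top == 3:
--         r = 3
--     elif top == 2 and second == 2:
--         r = 2
--     elif top == 2:
--         r = 1
--     else:
--         r = 0
--     return 13 ** 5 * r
--
--
-- def hand_hash(hand, joker_rule):
--     """Return a perfect hash of the hand, that represents the hand's power."""
--     values = "J23456789TQKA" if joker_rule else "23456789TJQKA"
--     value = 0
--     for lab in hand:
--         value = value * 13 + values.index(lab)
--     value *= 13 ** (5 - len(hand))
--     if joker_rule and "J" in hand:
--         strength = max(_strength(hand.replace("J", joker)) for joker in values)
--     else:
--         strength = _strength(hand)
--     return strength + value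
-- ===== Notes on version B (the rewrite author's own statement) =====
-- stated objective: alternative
-- what changed: Classification now sorts the multiplicities of the distinct labels into a descending signature and branches on its top two entries (instead of A's per-position duplicate counts, count-of-counts list and floor divisions), and the base-13 value is accumulated by Horner's rule instead of summing index*13**(4-k) over enumerate.
-- outside the precondition, e.g. on hand_hash('222222', True): A returns 30941.076923076922, B returns 30941.076923076926; on hand_hash('222222', False): A returns 0.0, B returns 0.0; on hand_hash('2X', False): A raises ValueError, B raises ValueError
import Mathlib
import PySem

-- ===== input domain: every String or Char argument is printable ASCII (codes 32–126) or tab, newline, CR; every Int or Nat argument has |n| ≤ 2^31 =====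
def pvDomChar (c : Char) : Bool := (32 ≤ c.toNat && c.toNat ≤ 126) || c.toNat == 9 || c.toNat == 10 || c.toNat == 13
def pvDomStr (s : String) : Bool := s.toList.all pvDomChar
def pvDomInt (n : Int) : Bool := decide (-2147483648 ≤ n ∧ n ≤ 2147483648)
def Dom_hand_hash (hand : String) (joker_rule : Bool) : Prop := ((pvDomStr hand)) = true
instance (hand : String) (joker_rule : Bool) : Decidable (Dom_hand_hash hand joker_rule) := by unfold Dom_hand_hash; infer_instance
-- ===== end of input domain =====

-- B replaces A's per-position duplicate counts / count-of-counts / floor-division classification by a sorted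
-- signature of the distinct labels' multiplicities, and the enumerate-sum of index*13^(4-k) by Horner's rule
-- (objective: alternative — same cost, different classification structure).

-- ===== PORT A =====
-- A-side helper: get_strength's branch cascade over nb_dups, taking the dups list A builds.
def gs_core (dups : List Int) : Int :=
  let max_val : Int := 13 ^ 5
  let nb_dups := (PySem.List.pyRange 0 5 1).map
    (fun k => PySem.Int.floordiv ((PySem.List.count dups (k + 1) : Int)) (k + 1))
  if PySem.List.pyGetD nb_dups (5 - 1) 0 = 1 then max_val * 6
  else if PySem.List.pyGetD nb_dups (4 - 1) 0 = 1 then max_val * 5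
  else if PySem.List.pyGetD nb_dups (3 - 1) 0 = 1 ∧ PySem.List.pyGetD nb_dups (2 - 1) 0 = 1 then max_val * 4
  else if PySem.List.pyGetD nb_dups (3 - 1) 0 = 1 then max_val * 3
  else if PySem.List.pyGetD nb_dups (2 - 1) 0 = 2 then max_val * 2
  else if PySem.List.pyGetD nb_dups (2 - 1) 0 = 1 then max_val * 1
  else 0

def get_strength (hand : List Char) : Int :=
  gs_core (hand.map (fun lab => (PySem.List.count hand lab : Int)))

-- hand.replace("J", joker) with single-char pattern and replacement is exactly this char map
def hand_hash (hand : String) (joker_rule : Bool) : Int :=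
  let values : List Char :=
    if !joker_rule then ['2', '3', '4', '5', '6', '7', '8', '9', 'T', 'J', 'Q', 'K', 'A']
    else ['J', '2', '3', '4', '5', '6', '7', '8', '9', 'T', 'Q', 'K', 'A']
  let hl := hand.toList
  let value : Int := ((PySem.List.enumerate hl 0).map
    (fun p => ((PySem.List.index? values p.2).getD 0 : Int) * 13 ^ (4 - p.1).toNat)).sum
  let strength : Int :=
    if !joker_rule || !(hl.contains 'J') then get_strength hl
    else (PySem.List.max?
      (values.map (fun joker => get_strength (hl.map (fun c => if c == 'J' then joker else c))))
      (fun x => x)).getD 0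
  strength + value

-- ===== PORT B =====
-- B-side helper: classify the descending multiplicity signature by its top two entries.
def sa_core (sig : List Int) : Int :=
  let top : Int := match sig with | [] => 0 | t :: _ => t
  let second : Int := match sig with | _ :: s :: _ => s | _ => 0
  let r : Int :=
    if top = 5 then 6
    else if top = 4 then 5
    else if top = 3 ∧ second = 2 then 4
    else if top = 3 then 3
    else if top = 2 ∧ second = 2 then 2
    else if top = 2 then 1
    else 0
  13 ^ 5 * r

def strength_alt (hand : List Char) : Int :=
  sa_core (PySem.List.sorted
    ((PySem.List.dedup hand).map (fun c => (PySem.List.count hand c : Int))) (fun x => x) true)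

def hand_hash_alt (hand : String) (joker_rule : Bool) : Int :=
  let values : List Char :=
    if joker_rule then ['J', '2', '3', '4', '5', '6', '7', '8', '9', 'T', 'Q', 'K', 'A']
    else ['2', '3', '4', '5', '6', '7', '8', '9', 'T', 'J', 'Q', 'K', 'A']
  let hl := hand.toList
  let value0 : Int := hl.foldl (fun v lab => v * 13 + ((PySem.List.index? values lab).getD 0 : Int)) 0
  let value : Int := value0 * 13 ^ (5 - hl.length)
  let strength : Int :=
    if joker_rule && hl.contains 'J' then
      (PySem.List.max?
        (values.map (fun joker => strength_alt (hl.map (fun c => if c == 'J' then joker else c))))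
        (fun x => x)).getD 0
    else strength_alt hl
  strength + value

-- ===== PRECONDITION & SPEC =====
-- Pre_ excludes hands longer than 5 cards (A's 13**(4-k) is then fractional, so A returns a float, not an
-- int) and hands with a character outside the 13 card labels (values.index raises ValueError in A).
def Pre_hand_hash (hand : String) (joker_rule : Bool) : Prop :=
  hand.toList.length ≤ 5 ∧
    hand.toList.all (fun c => (['2', '3', '4', '5', '6', '7', '8', '9', 'T', 'J', 'Q', 'K', 'A'] : List Char).contains c) = true
instance (hand : String) (joker_rule : Bool) : Decidable (Pre_hand_hash hand joker_rule) := by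
  unfold Pre_hand_hash; infer_instance

def pvWitness_hand_hash : String × Bool := ("AKQJT", false)

def Spec_hand_hash (hand : String) (joker_rule : Bool) (out : Int) : Prop := out = hand_hash_alt hand joker_rule
instance (hand : String) (joker_rule : Bool) (out : Int) : Decidable (Spec_hand_hash hand joker_rule out) := by
  unfold Spec_hand_hash; infer_instance

-- ===== CLAIM (what is proved, stated in full; the proofs are below) =====
def Claim_equal_hand_hash : Prop := ∀ (hand : String) (joker_rule : Bool), Dom_hand_hash hand joker_rule → Pre_hand_hash hand joker_rule → Spec_hand_hash hand joker_rule (hand_hash hand joker_rule)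

-- ===== LEMMAS AND PROOFS =====

-- the canonical 5-letter alphabet used to relabel a hand, and all its hands of length ≤ n
def alphaL : List Char := ['a', 'b', 'c', 'd', 'e']

def allUpTo : Nat → List (List Char)
  | 0 => [[]]
  | n + 1 => [] :: alphaL.flatMap (fun c => (allUpTo n).map (c :: ·))

theorem mem_allUpTo (m : List Char) : ∀ n : Nat, m.length ≤ n → (∀ c ∈ m, c ∈ alphaL) → m ∈ allUpTo n := by
  induction m with
  | nil => intro n _ _; cases n <;> exact List.mem_cons_self
  | cons c t ih =>
    intro n hlen hmem
    cases n with
    | zero => simp at hlen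
    | succ n =>
      refine List.mem_cons_of_mem _ ?_
      rw [List.mem_flatMap]
      exact ⟨c, hmem c List.mem_cons_self,
        List.mem_map.2 ⟨t, ih n (by simp at hlen; omega) (fun x hx => hmem x (List.mem_cons_of_mem _ hx)), rfl⟩⟩

set_option maxHeartbeats 1000000 in
set_option maxRecDepth 40000 in
theorem enum_a : ∀ t ∈ allUpTo 4, get_strength ('a' :: t) = strength_alt ('a' :: t) := by decide
set_option maxHeartbeats 1000000 in
set_option maxRecDepth 40000 in
theorem enum_b : ∀ t ∈ allUpTo 4, get_strength ('b' :: t) = strength_alt ('b' :: t) := by decide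
set_option maxHeartbeats 1000000 in
set_option maxRecDepth 40000 in
theorem enum_c : ∀ t ∈ allUpTo 4, get_strength ('c' :: t) = strength_alt ('c' :: t) := by decide
set_option maxHeartbeats 1000000 in
set_option maxRecDepth 40000 in
theorem enum_d : ∀ t ∈ allUpTo 4, get_strength ('d' :: t) = strength_alt ('d' :: t) := by decide
set_option maxHeartbeats 1000000 in
set_option maxRecDepth 40000 in
theorem enum_e : ∀ t ∈ allUpTo 4, get_strength ('e' :: t) = strength_alt ('e' :: t) := by decide

theorem enum_ok (m : List Char) (hlen : m.length ≤ 5) (hmem : ∀ c ∈ m, c ∈ alphaL) :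
    get_strength m = strength_alt m := by
  match m with
  | [] => decide
  | c :: t =>
    have ht : t ∈ allUpTo 4 := mem_allUpTo t 4 (by simp at hlen; omega) (fun x hx => hmem x (List.mem_cons_of_mem _ hx))
    have hc : c ∈ alphaL := hmem c List.mem_cons_self
    simp only [alphaL, List.mem_cons, List.not_mem_nil, or_false] at hc
    rcases hc with rfl | rfl | rfl | rfl | rfl
    · exact enum_a t ht
    · exact enum_b t ht
    · exact enum_c t ht
    · exact enum_d t ht
    · exact enum_e t ht

theorem count_map_injOn (f : Char → Char) (l : List Char) (a : Char)
    (h : ∀ x ∈ l, f x = f a → x = a) : (l.map f).count (f a) = l.count a := by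
  induction l with
  | nil => rfl
  | cons b t ih =>
    simp only [List.map_cons, List.count_cons]
    rw [ih (fun x hx => h x (List.mem_cons_of_mem _ hx))]
    by_cases hba : b = a
    · subst hba; simp
    · have : f b ≠ f a := fun he => hba (h b List.mem_cons_self he)
      simp [hba, this]

theorem sortedRev_eq_of_perm (xs ys : List Int) (h : xs.Perm ys) :
    PySem.List.sorted xs (fun x => x) true = PySem.List.sorted ys (fun x => x) true := by
  have p : (PySem.List.sorted xs (fun x => x) true).Perm (PySem.List.sorted ys (fun x => x) true) :=
    (PySem.List.sorted_perm _ _ _).trans (h.trans (PySem.List.sorted_perm _ _ _).symm)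
  exact p.eq_of_pairwise (fun a b _ _ h1 h2 => le_antisymm h2 h1)
    (PySem.List.sorted_pairwise_rev _ _) (PySem.List.sorted_pairwise_rev _ _)

theorem get_strength_relabel (f : Char → Char) (l : List Char)
    (hinj : ∀ x ∈ l, ∀ y ∈ l, f x = f y → x = y) : get_strength (l.map f) = get_strength l := by
  unfold get_strength
  congr 1
  rw [List.map_map]
  refine List.map_congr_left (fun x hx => ?_)
  simp only [Function.comp, PySem.List.count_eq]
  exact_mod_cast congrArg (fun n : Nat => (n : Int))
    (count_map_injOn f l x (fun y hy he => hinj y hy x hx he))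

theorem strength_alt_relabel (f : Char → Char) (l : List Char)
    (hinj : ∀ x ∈ l, ∀ y ∈ l, f x = f y → x = y) : strength_alt (l.map f) = strength_alt l := by
  unfold strength_alt
  congr 1
  apply sortedRev_eq_of_perm
  have hperm : (PySem.List.dedup (l.map f)).Perm ((PySem.List.dedup l).map f) := by
    refine (List.perm_ext_iff_of_nodup (PySem.List.nodup_dedup _) ?_).2 (fun x => ?_)
    · exact (PySem.List.nodup_dedup l).map_on
        (fun a ha b hb => hinj a ((PySem.List.mem_dedup _ _).1 ha) b ((PySem.List.mem_dedup _ _).1 hb))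
    · simp [List.mem_map]
  have h2 : ((PySem.List.dedup l).map f).map (fun c => (PySem.List.count (l.map f) c : Int))
      = (PySem.List.dedup l).map (fun c => (PySem.List.count l c : Int)) := by
    rw [List.map_map]
    refine List.map_congr_left (fun x hx => ?_)
    simp only [Function.comp, PySem.List.count_eq]
    exact_mod_cast congrArg (fun n : Nat => (n : Int))
      (count_map_injOn f l x (fun y hy he => hinj y hy x ((PySem.List.mem_dedup _ _).1 hx) he))
  exact h2 ▸ hperm.map (fun c => (PySem.List.count (l.map f) c : Int))

theorem strength_eq (l : List Char) (h5 : l.length ≤ 5) : get_strength l = strength_alt l := by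
  set d := PySem.List.dedup l with hd
  set f : Char → Char := fun c => alphaL.getD (d.idxOf c) 'a' with hf
  have hdlen : d.length ≤ 5 := le_trans (by rw [hd]; simpa using PySem.Set.length_ofList_le l) h5
  have hidx : ∀ x ∈ l, d.idxOf x < 5 := fun x hx =>
    lt_of_lt_of_le (List.idxOf_lt_length_of_mem ((PySem.List.mem_dedup _ _).2 hx)) hdlen
  have hinj : ∀ x ∈ l, ∀ y ∈ l, f x = f y → x = y := by
    intro x hx y hy he
    have hix := hidx x hx
    have hiy := hidx y hy
    have hxd : x ∈ d := (PySem.List.mem_dedup _ _).2 hx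
    have hyd : y ∈ d := (PySem.List.mem_dedup _ _).2 hy
    have hixd := List.idxOf_lt_length_of_mem hxd
    have hiyd := List.idxOf_lt_length_of_mem hyd
    simp only [hf] at he
    rw [List.getD_eq_getElem _ _ (by simpa [alphaL] using hix),
        List.getD_eq_getElem _ _ (by simpa [alphaL] using hiy)] at he
    have hij : d.idxOf x = d.idxOf y :=
      (List.Nodup.getElem_inj_iff (by decide : alphaL.Nodup)).1 he
    calc x = d[d.idxOf x]'hixd := (List.getElem_idxOf _).symm
      _ = d[d.idxOf y]'hiyd := by simp [hij]
      _ = y := List.getElem_idxOf _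
  have himg : ∀ c ∈ l.map f, c ∈ alphaL := by
    rintro c hc
    rcases List.mem_map.1 hc with ⟨x, hx, rfl⟩
    have := hidx x hx
    simp only [hf]
    rw [List.getD_eq_getElem _ _ (by simpa [alphaL] using this)]
    exact List.getElem_mem _
  calc get_strength l = get_strength (l.map f) := (get_strength_relabel f l hinj).symm
    _ = strength_alt (l.map f) := enum_ok (l.map f) (by simpa using h5) himg
    _ = strength_alt l := strength_alt_relabel f l hinj

theorem value_eq (f : Char → Int) (l : List Char) (h5 : l.length ≤ 5) :
    ((PySem.List.enumerate l 0).map (fun p => f p.2 * 13 ^ (4 - p.1).toNat)).sum =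
      (l.foldl (fun v c => v * 13 + f c) 0) * 13 ^ (5 - l.length) := by
  rcases l with _ | ⟨a, _ | ⟨b, _ | ⟨c, _ | ⟨d, _ | ⟨e, _ | ⟨x, t⟩⟩⟩⟩⟩⟩
  · simp [PySem.List.enumerate_nil]
  · simp [PySem.List.enumerate_cons, PySem.List.enumerate_nil]
  · simp [PySem.List.enumerate_cons, PySem.List.enumerate_nil]; ring
  · simp [PySem.List.enumerate_cons, PySem.List.enumerate_nil]; ring
  · simp [PySem.List.enumerate_cons, PySem.List.enumerate_nil]; ring
  · simp [PySem.List.enumerate_cons, PySem.List.enumerate_nil]; ring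
  · exfalso; simp at h5; omega

theorem hand_hash_spec : Claim_equal_hand_hash := by
  intro hand joker_rule _dom hpre
  obtain ⟨h5, _hmem⟩ := hpre
  unfold Spec_hand_hash hand_hash hand_hash_alt
  cases joker_rule
  · simp only [Bool.not_true, Bool.not_false, Bool.true_or, Bool.false_or, Bool.true_and, Bool.false_and, Bool.false_eq_true, eq_self_iff_true, ite_true, ite_false]
    rw [strength_eq _ h5,
      value_eq (fun lab => ((PySem.List.index? (['2', '3', '4', '5', '6', '7', '8', '9', 'T', 'J', 'Q', 'K', 'A'] : List Char) lab).getD 0 : Int)) hand.toList h5]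
  · simp only [Bool.not_true, Bool.not_false, Bool.true_or, Bool.false_or, Bool.true_and, Bool.false_and, Bool.false_eq_true, eq_self_iff_true, ite_true, ite_false]
    have hrepl : ∀ j : Char,
        get_strength (hand.toList.map (fun c => if c == 'J' then j else c)) =
          strength_alt (hand.toList.map (fun c => if c == 'J' then j else c)) :=
      fun j => strength_eq _ (by simpa using h5)
    cases hc : hand.toList.contains 'J'
    · simp only [Bool.not_true, Bool.not_false, Bool.true_or, Bool.false_or, Bool.true_and, Bool.false_and, Bool.false_eq_true, eq_self_iff_true, ite_true, ite_false]
      rw [strength_eq _ h5,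
        value_eq (fun lab => ((PySem.List.index? (['J', '2', '3', '4', '5', '6', '7', '8', '9', 'T', 'Q', 'K', 'A'] : List Char) lab).getD 0 : Int)) hand.toList h5]
    · simp only [Bool.not_true, Bool.not_false, Bool.true_or, Bool.false_or, Bool.true_and, Bool.false_and, Bool.false_eq_true, eq_self_iff_true, ite_true, ite_false]
      simp only [hrepl]
      rw [value_eq (fun lab => ((PySem.List.index? (['J', '2', '3', '4', '5', '6', '7', '8', '9', 'T', 'Q', 'K', 'A'] : List Char) lab).getD 0 : Int)) hand.toList h5]
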